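-- pv_equiv track=rewrite | github.com/leila100/coding-exercises | codeSignal/theCore/loopTunnel/rounders.py | rounders
-- ===== SOURCE A (Python) =====
-- def rounders(n):
--     nList = [int(x) for x in str(n)]
--     idx = len(nList)-1
--     while idx > 0:
--         if nList[idx] < 5:
--             nList[idx] = 0
--         else:
--             nList[idx] = 0
--             nList[idx-1] += 1
--         idx -= 1
--     return int("".join([str(x) for x in nList]))
-- ===== SOURCE B (Python) =====
-- def rounders(n):
--     num = n
--     place = 10
--     for _ in range(len(str(n)) - 1):
--         r = num % place
--         num -= r
--         if 2 * r >= place: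
--             num += place
--         place *= 10
--     return num
-- ===== Notes on version B (the rewrite author's own statement) =====
-- stated objective: alternative
-- what changed: Replaces the right-to-left digit-array mutation plus string re-join/re-parse with pure successive numeric rounding: num is rounded half-up at places 10, 100, ... via modular arithmetic, one step per digit.
import Mathlib
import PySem

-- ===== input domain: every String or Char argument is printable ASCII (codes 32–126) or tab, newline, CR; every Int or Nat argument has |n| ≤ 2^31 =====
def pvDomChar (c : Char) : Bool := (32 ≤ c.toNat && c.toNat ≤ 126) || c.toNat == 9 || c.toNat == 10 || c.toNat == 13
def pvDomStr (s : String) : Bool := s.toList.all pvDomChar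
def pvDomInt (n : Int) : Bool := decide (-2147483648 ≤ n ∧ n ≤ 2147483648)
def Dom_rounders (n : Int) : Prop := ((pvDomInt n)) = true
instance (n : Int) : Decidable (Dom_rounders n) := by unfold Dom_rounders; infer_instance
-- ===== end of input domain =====

-- B replaces A's right-to-left digit-array mutation and string re-join/re-parse with successive
-- numeric round-half-up at places 10, 100, ... via modular arithmetic (alternative algorithm).
-- A raises ValueError on negative n (int('-') while parsing str(n)); Pre_ excludes n < 0.


-- ===== PORT A =====
-- the while-loop: idx counts down from len-1 to 1; the list is the mutable nList.
-- the pyGet? indices are always in range (idx < len, idx-1 ≥ 0), so .getD 0 is never taken.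
def aLoop : List Int → Nat → List Int
  | l, 0 => l
  | l, i+1 =>
      if (PySem.List.pyGet? l ((i : Int)+1)).getD 0 < 5 then
        aLoop (l.set (i+1) 0) i
      else
        aLoop ((l.set (i+1) 0).set i (((PySem.List.pyGet? l (i : Int)).getD 0) + 1)) i

def rounders (n : Int) : Int :=
  match (PySem.Int.toChars n).mapM (fun c => PySem.Int.ofChars? [c]) with
  | none => 0  -- ValueError while parsing a char of str(n): excluded by Pre_rounders
  | some nList =>
      let nList := aLoop nList (nList.length - 1)
      -- int("".join([str(x) for x in nList])); the final getD 0 is never taken (all-digit string)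
      (PySem.Int.ofChars? (PySem.Chars.join [] (nList.map PySem.Int.toChars))).getD 0

-- ===== PORT B =====
-- the for-loop of Source B: k remaining iterations, state (num, place).
def bLoop : Int → Int → Nat → Int
  | num, _, 0 => num
  | num, place, k+1 =>
      let r := PySem.Int.mod num place
      let num := num - r
      let num := if 2 * r ≥ place then num + place else num
      bLoop num (place * 10) k

def rounders_alt (n : Int) : Int :=
  bLoop n 10 ((PySem.Int.toChars n).length - 1)

-- ===== PRECONDITION & SPEC =====
-- Pre_ excludes exactly n < 0, where A raises ValueError (int('-') on the sign character of str(n)).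
def Pre_rounders (n : Int) : Prop := 0 ≤ n
instance (n : Int) : Decidable (Pre_rounders n) := by unfold Pre_rounders; infer_instance
def pvWitness_rounders : Int := 15
def Spec_rounders (n : Int) (out : Int) : Prop := out = rounders_alt n
instance (n : Int) (out : Int) : Decidable (Spec_rounders n out) := by unfold Spec_rounders; infer_instance

-- ===== CLAIM (what is proved, stated in full; the proofs are below) =====
def Claim_equal_rounders : Prop := ∀ (n : Int), Dom_rounders n → Pre_rounders n → Spec_rounders n (rounders n)

-- ===== LEMMAS AND PROOFS =====

-- Horner value of a big-endian digit list
def pvVal (l : List Int) : Int := l.foldl (fun a d => 10 * a + d) 0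

theorem pvVal_append_singleton (xs : List Int) (a : Int) :
    pvVal (xs ++ [a]) = 10 * pvVal xs + a := by
  simp [pvVal, List.foldl_append]

theorem pvVal_digits (L : List Nat) :
    pvVal (L.reverse.map Int.ofNat) = (Nat.ofDigits 10 L : Int) := by
  induction L with
  | nil => simp [pvVal, Nat.ofDigits]
  | cons a L ih =>
      simp only [List.reverse_cons, List.map_append, List.map_cons, List.map_nil,
        pvVal_append_singleton, ih]
      rw [show Nat.ofDigits (10:Int) (a :: L) = (a : Int) + 10 * Nat.ofDigits (10:Int) L from rfl]
      simp only [Int.ofNat_eq_natCast]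
      ring

-- characterization of Nat.toDigits 10 (the decimal string of str(n))
theorem toDigitsCore_eq (f : Nat) : ∀ (m : Nat) (l : List Char), 0 < m → m < f →
    Nat.toDigitsCore 10 f m l = ((Nat.digits 10 m).map Nat.digitChar).reverse ++ l := by
  induction f with
  | zero => intro m l hm hf; omega
  | succ f ih =>
      intro m l hm hf
      rw [Nat.toDigitsCore]
      by_cases h : m / 10 = 0
      · have hml : m < 10 := by omega
        rw [Nat.digits_of_lt 10 m (by omega) hml]
        simp [h, Nat.mod_eq_of_lt hml]
      · have h1 : 0 < m / 10 := Nat.pos_of_ne_zero h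
        have h2 : m / 10 < f := by
          have := Nat.div_lt_self hm (by norm_num : 1 < 10)
          omega
        simp only [h, if_false, ih (m / 10) _ h1 h2]
        rw [Nat.digits_def' (by norm_num : (1:Nat) < 10) hm]
        simp

theorem toDigits_eq (m : Nat) (hm : 0 < m) :
    Nat.toDigits 10 m = ((Nat.digits 10 m).reverse.map Nat.digitChar) := by
  rw [Nat.toDigits, toDigitsCore_eq (m+1) m [] hm (by omega)]
  simp [List.map_reverse]

-- parsing a single decimal digit character (int(x) in A's comprehension)
theorem parse_digitChar : ∀ d : Nat, d < 10 → PySem.Int.ofChars? [Nat.digitChar d] = some (d : Int) := by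
  decide

theorem mapM_digitChars (ds : List Nat) (h : ∀ d ∈ ds, d < 10) :
    (ds.map Nat.digitChar).mapM (fun c => PySem.Int.ofChars? [c]) = some (ds.map Int.ofNat) := by
  induction ds with
  | nil => rfl
  | cons a ds ih =>
      simp only [List.map_cons, List.mapM_cons, parse_digitChar a (h a (by simp)),
        ih (fun d hd => h d (by simp [hd]))]
      rfl

-- parsing back int("".join(...)) where the final list is g followed by zeros, g ≤ 10, ≤ 9 zeros
theorem parse_head_zeros : ∀ g : Nat, g < 11 → ∀ k : Nat, k < 10 →
    PySem.Int.ofChars? (PySem.Int.toChars (g : Int) ++ List.replicate k '0') = some ((g : Int) * 10 ^ k) := by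
  decide

-- the key correspondence: A's digit loop vs B's numeric rounding loop
theorem key (front : List Int) : ∀ (d : Int) (z : Nat),
    (∀ e ∈ front, 0 ≤ e ∧ e ≤ 9) → 0 ≤ d → d ≤ 10 →
    ∃ g : Int, 0 ≤ g ∧ g ≤ 10 ∧
      aLoop (front ++ d :: List.replicate z 0) front.length = g :: List.replicate (front.length + z) 0 ∧
      g * 10 ^ (front.length + z) = bLoop ((pvVal front * 10 + d) * 10 ^ z) (10 ^ (z+1)) front.length := by
  induction front using List.reverseRecOn with
  | nil =>
      intro d z _ hd0 hd10
      exact ⟨d, hd0, hd10, by simp [aLoop], by simp [bLoop, pvVal]⟩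
  | append_singleton f' e ih =>
      intro d z hfront hd0 hd10
      obtain ⟨he0, he9⟩ := hfront e (by simp)
      have hf' : ∀ x ∈ f', 0 ≤ x ∧ x ≤ 9 := fun x hx => hfront x (by simp [hx])
      have hlen : (f' ++ [e]).length = f'.length + 1 := by simp
      have hassoc : (f' ++ [e]) ++ d :: List.replicate z 0 = f' ++ e :: d :: List.replicate z 0 := by simp
      have hget1 : PySem.List.pyGet? (f' ++ e :: d :: List.replicate z 0) ((f'.length : Int) + 1) = some d := by
        rw [show ((f'.length : Int) + 1) = ((f'.length + 1 : Nat) : Int) by push_cast; ring,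
          PySem.List.pyGet?_natCast, List.getElem?_append_right (by omega)]
        simp
      have hget0 : PySem.List.pyGet? (f' ++ e :: d :: List.replicate z 0) (f'.length : Int) = some e := by
        rw [PySem.List.pyGet?_natCast, List.getElem?_append_right (by omega)]
        simp
      have hset1 : (f' ++ e :: d :: List.replicate z 0).set (f'.length + 1) 0
          = f' ++ e :: List.replicate (z+1) 0 := by
        rw [List.set_append, if_neg (by omega)]
        simp [List.replicate_succ]
      have hset0 : (f' ++ e :: List.replicate (z+1) 0).set f'.length (e + 1)
          = f' ++ (e + 1) :: List.replicate (z+1) 0 := by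
        rw [List.set_append, if_neg (by omega)]
        simp
      -- B-side one-step arithmetic
      have hP : (0:Int) < 10 ^ z := by positivity
      have hpow : ((10:Int) ^ (z+1)) = 10 ^ z * 10 := by ring
      have hbstep : bLoop ((pvVal (f' ++ [e]) * 10 + d) * 10 ^ z) (10 ^ (z+1)) (f'.length + 1)
          = bLoop ((pvVal f' * 10 + (e + (if d < 5 then 0 else 1))) * 10 ^ (z+1)) (10 ^ (z+2)) f'.length := by
        show bLoop _ _ (f'.length + 1) = _
        rw [bLoop]
        have hval : pvVal (f' ++ [e]) = 10 * pvVal f' + e := pvVal_append_singleton f' e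
        by_cases hd9 : d ≤ 9
        · have hr : PySem.Int.mod ((pvVal (f' ++ [e]) * 10 + d) * 10 ^ z) (10 ^ (z+1)) = d * 10 ^ z := by
            rw [PySem.Int.mod_eq_emod_of_pos (by positivity), hval, hpow,
              show ((10 * pvVal f' + e) * 10 + d) * 10 ^ z = d * 10 ^ z + (10 ^ z * 10) * (10 * pvVal f' + e) by ring,
              Int.add_mul_emod_self_left]
            exact Int.emod_eq_of_lt (by positivity) (by nlinarith)
          rw [hr]
          by_cases hd5 : d < 5
          · rw [if_neg (by nlinarith), if_pos hd5]
            rw [hval, hpow]; ring_nf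
          · rw [if_pos (by push Not at hd5; nlinarith), if_neg hd5]
            rw [hval, hpow]; ring_nf
        · have hd : d = 10 := by omega
          subst hd
          have hr : PySem.Int.mod ((pvVal (f' ++ [e]) * 10 + 10) * 10 ^ z) (10 ^ (z+1)) = 0 := by
            rw [PySem.Int.mod_eq_emod_of_pos (by positivity), hpow,
              show (pvVal (f' ++ [e]) * 10 + 10) * 10 ^ z = 0 + (10 ^ z * 10) * (pvVal (f' ++ [e]) + 1) by ring,
              Int.add_mul_emod_self_left]
            rfl
          rw [hr, if_neg (by simp), if_neg (by norm_num)]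
          rw [hval, hpow]; ring_nf
      -- combine with one unfolding of aLoop
      rw [hlen, hassoc]
      by_cases hd5 : d < 5
      · obtain ⟨g, hg0, hg10, hA, hB⟩ := ih e (z+1) hf' he0 (by omega)
        refine ⟨g, hg0, hg10, ?_, ?_⟩
        · rw [aLoop, hget1]
          simp only [Option.getD_some, if_pos hd5, hset1]
          rw [hA]
          congr 2
          omega
        · rw [hbstep, if_pos hd5, add_zero,
            show f'.length + 1 + z = f'.length + (z+1) by omega]
          exact hB
      · obtain ⟨g, hg0, hg10, hA, hB⟩ := ih (e + 1) (z+1) hf' (by omega) (by omega)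
        refine ⟨g, hg0, hg10, ?_, ?_⟩
        · rw [aLoop, hget1]
          simp only [Option.getD_some, if_neg hd5, hset1, hget0, hset0]
          rw [hA]
          congr 2
          omega
        · rw [hbstep, if_neg hd5,
            show f'.length + 1 + z = f'.length + (z+1) by omega]
          exact hB

-- every digit of a positive number is in [0, 9] after casting
theorem digit_bounds (m : Nat) : ∀ e ∈ (Nat.digits 10 m).reverse.map Int.ofNat, 0 ≤ e ∧ e ≤ 9 := by
  intro e he
  simp only [List.mem_map, List.mem_reverse] at he
  obtain ⟨d, hd, rfl⟩ := he
  have := Nat.digits_lt_base (by norm_num : (1:Nat) < 10) hd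
  simp only [Int.ofNat_eq_natCast]
  omega

-- "".join of the final list: head string followed by k "0" strings
theorem join_head_zeros (k : Nat) : ∀ x : List Char,
    PySem.Chars.join [] (x :: List.replicate k ['0']) = x ++ List.replicate k '0' := by
  induction k with
  | zero => intro x; simp [PySem.Chars.join_singleton]
  | succ k ih =>
      intro x
      rw [List.replicate_succ, PySem.Chars.join_cons_cons, ih ['0']]
      simp [List.replicate_succ]

-- ===== VERDICT (by name: the statement is the Claim_ definition above) =====
theorem rounders_spec : Claim_equal_rounders := by
  intro n hdom hpre
  unfold Spec_rounders
  have hn : 0 ≤ n := hpre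
  obtain ⟨m, rfl⟩ : ∃ m : Nat, n = (m : Int) := ⟨n.toNat, by omega⟩
  by_cases h0 : m = 0
  · subst h0; decide
  · have hmpos : 0 < m := Nat.pos_of_ne_zero h0
    have hm31 : (m : Int) ≤ 2147483648 := by
      unfold Dom_rounders pvDomInt at hdom
      simpa using (of_decide_eq_true hdom).2
    -- the decimal digit string of str(m)
    have hchars : PySem.Int.toChars (m : Int) =
        (Nat.digits 10 m).reverse.map Nat.digitChar := by
      rw [show PySem.Int.toChars (m : Int) = Nat.toDigits 10 ((m : Int)).toNat by
        simp [PySem.Int.toChars, not_lt.mpr (Int.natCast_nonneg m)]]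
      rw [Int.toNat_natCast, toDigits_eq m hmpos]
    have hmapM : ((Nat.digits 10 m).reverse.map Nat.digitChar).mapM
        (fun c => PySem.Int.ofChars? [c]) = some ((Nat.digits 10 m).reverse.map Int.ofNat) :=
      mapM_digitChars _ (fun d hd => Nat.digits_lt_base (by norm_num) (List.mem_reverse.mp hd))
    set D : List Int := (Nat.digits 10 m).reverse.map Int.ofNat with hD
    have hDne : D ≠ [] := by
      simp [hD, Nat.digits_ne_nil_iff_ne_zero.mpr h0]
    have hsplit : D.dropLast ++ D.getLast hDne :: List.replicate 0 0 = D := by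
      simpa using List.dropLast_append_getLast hDne
    have hlenD : D.length = (Nat.digits 10 m).length := by simp [hD]
    have hlen10 : (Nat.digits 10 m).length ≤ 10 :=
      (Nat.digits_length_le_iff (by norm_num) m).mpr (by omega)
    have hlast := digit_bounds m (D.getLast hDne) (hD ▸ List.getLast_mem hDne)
    obtain ⟨g, hg0, hg10, hA, hB⟩ := key D.dropLast (D.getLast hDne) 0
      (fun e he => digit_bounds m e (hD ▸ List.dropLast_subset D he))
      hlast.1 (by omega)
    rw [hsplit] at hA
    have hnum : pvVal D.dropLast * 10 + D.getLast hDne = pvVal D := by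
      conv_rhs => rw [← hsplit]
      rw [show D.dropLast ++ D.getLast hDne :: List.replicate 0 0
          = D.dropLast ++ [D.getLast hDne] by simp, pvVal_append_singleton]
      ring
    have hkk : D.dropLast.length = D.length - 1 := by simp
    obtain ⟨gn, rfl⟩ : ∃ gn : Nat, g = (gn : Int) := ⟨g.toNat, by omega⟩
    -- evaluate port A
    have hval : pvVal D = (m : Int) := by
      rw [hD, pvVal_digits, show (10:Int) = ((10:Nat):Int) by norm_num, ← Nat.coe_ofDigits,
        Nat.ofDigits_digits]
    have hA' : rounders (m : Int) = (gn : Int) * 10 ^ (D.length - 1) := by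
      unfold rounders
      rw [hchars, hmapM]
      dsimp only
      rw [← hkk, hA, List.map_cons, List.map_replicate,
        show PySem.Int.toChars (0 : Int) = ['0'] from rfl,
        join_head_zeros _ _,
        parse_head_zeros gn (by omega) (D.dropLast.length + 0) (by omega),
        Option.getD_some, add_zero]
    -- evaluate port B
    have hB' : rounders_alt (m : Int) = (gn : Int) * 10 ^ (D.length - 1) := by
      unfold rounders_alt
      rw [hchars]
      have : ((Nat.digits 10 m).reverse.map Nat.digitChar).length = D.length := by
        simp [hD]
      rw [this]
      rw [hnum, hval] at hB
      norm_num at hB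
      exact hB.symm
    rw [hA', hB']
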